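-- pv_equiv track=rewrite | github.com/vinayiet/Spam-_Ham_Classifier | Preprocess/preprocess.py | is_common_greeting
-- ===== SOURCE A (Python) =====
-- def is_common_greeting(text):
--     """Check if the text is a common greeting or short benign message"""
--     common_greetings = [
--         "hi", "hello", "hey", "good morning", "good afternoon", "good evening",
--         "how are you", "what's up", "wassup", "yo", "hola", "howdy", "greetings"
--     ]
--
--     # Clean text for comparison
--     cleaned_text = text.lower().strip().replace("!", "").replace(".", "")
--
--     # Check for exact matches
--     if cleaned_text in common_greetings:
--         return True
--
--     # Check for short messages (3 words or less) that don't contain suspicious terms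
--     if len(cleaned_text.split()) <= 3:
--         suspicious_terms = ["urgent", "money", "offer", "win", "click", "account", "bank"]
--         if not any(term in cleaned_text for term in suspicious_terms):
--             return True
--
--     return False
-- ===== SOURCE B (Python) =====
-- def is_common_greeting(text):
--     """Check if the text is a common greeting or short benign message"""
--     # Every listed greeting is at most 3 words and contains no suspicious term,
--     # so the exact-match list is redundant: one predicate suffices.
--     cleaned_text = text.lower().strip().replace("!", "").replace(".", "")
--     suspicious_terms = ["urgent", "money", "offer", "win", "click", "account", "bank"]
--     return len(cleaned_text.split()) <= 3 and not any(term in cleaned_text for term in suspicious_terms)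
-- ===== Notes on version B (the rewrite author's own statement) =====
-- stated objective: simpler
-- what changed: B drops A's 13-entry greeting list and its exact-match branch entirely (every listed greeting is already at most three words with no suspicious substring), returning the single short-and-benign predicate directly.
import Mathlib
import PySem

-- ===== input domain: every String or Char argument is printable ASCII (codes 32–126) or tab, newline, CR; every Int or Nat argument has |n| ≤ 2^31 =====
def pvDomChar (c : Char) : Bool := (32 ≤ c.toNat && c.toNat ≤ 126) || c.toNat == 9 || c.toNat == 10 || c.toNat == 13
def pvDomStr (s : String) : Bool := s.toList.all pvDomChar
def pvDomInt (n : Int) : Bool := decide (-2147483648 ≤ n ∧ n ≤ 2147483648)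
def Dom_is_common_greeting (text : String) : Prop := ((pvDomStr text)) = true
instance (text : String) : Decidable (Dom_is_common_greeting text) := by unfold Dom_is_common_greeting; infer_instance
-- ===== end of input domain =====

-- B removes A's redundant greeting-list exact-match branch (each listed greeting already passes the short-and-benign test), leaving one predicate: simpler.
-- ===== PORT A =====
def is_common_greeting (text : String) : Bool :=
  let common_greetings : List String :=
    ["hi", "hello", "hey", "good morning", "good afternoon", "good evening",
     "how are you", "what's up", "wassup", "yo", "hola", "howdy", "greetings"]
  let cleaned_text :=
    PySem.Str.replace (PySem.Str.replace (PySem.Str.strip (PySem.Str.lower text)) "!" "") "." ""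
  if common_greetings.contains cleaned_text then true
  else if (PySem.Str.split₀ cleaned_text).length ≤ 3 then
    let suspicious_terms : List String := ["urgent", "money", "offer", "win", "click", "account", "bank"]
    if !(suspicious_terms.any (fun term => PySem.Str.isIn term cleaned_text)) then true
    else false
  else false

-- ===== PORT B =====
def is_common_greeting_alt (text : String) : Bool :=
  let cleaned_text :=
    PySem.Str.replace (PySem.Str.replace (PySem.Str.strip (PySem.Str.lower text)) "!" "") "." ""
  let suspicious_terms : List String := ["urgent", "money", "offer", "win", "click", "account", "bank"]
  decide ((PySem.Str.split₀ cleaned_text).length ≤ 3)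
    && !(suspicious_terms.any (fun term => PySem.Str.isIn term cleaned_text))

-- ===== PRECONDITION & SPEC =====
def Spec_is_common_greeting (text : String) (out : Bool) : Prop := out = is_common_greeting_alt text
instance (text : String) (out : Bool) : Decidable (Spec_is_common_greeting text out) := by unfold Spec_is_common_greeting; infer_instance

-- ===== CLAIM (what is proved, stated in full; the proofs are below) =====
def Claim_equal_is_common_greeting : Prop := ∀ (text : String), Dom_is_common_greeting text → Spec_is_common_greeting text (is_common_greeting text)

-- ===== LEMMAS AND PROOFS =====

-- Every greeting in A's list already satisfies B's single predicate (≤3 words, no suspicious term).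
lemma greeting_benign :
    ∀ s ∈ (["hi", "hello", "hey", "good morning", "good afternoon", "good evening",
             "how are you", "what's up", "wassup", "yo", "hola", "howdy", "greetings"] : List String),
      (decide ((PySem.Str.split₀ s).length ≤ 3)
        && !((["urgent", "money", "offer", "win", "click", "account", "bank"] : List String).any
              (fun term => PySem.Str.isIn term s))) = true := by decide

-- ===== VERDICT (by name: the statement is the Claim_ definition above) =====
theorem is_common_greeting_spec : Claim_equal_is_common_greeting := by
  intro text _
  unfold Spec_is_common_greeting is_common_greeting is_common_greeting_alt
  set cleaned := PySem.Str.replace (PySem.Str.replace (PySem.Str.strip (PySem.Str.lower text)) "!" "") "." "" with hc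
  by_cases hmem : (["hi", "hello", "hey", "good morning", "good afternoon", "good evening",
      "how are you", "what's up", "wassup", "yo", "hola", "howdy", "greetings"] : List String).contains cleaned
  · simp only [hmem, if_true]
    exact (greeting_benign cleaned (List.contains_iff_mem.mp hmem)).symm
  · simp only [hmem, Bool.false_eq_true, if_false]
    by_cases hlen : (PySem.Str.split₀ cleaned).length ≤ 3
    · simp [hlen]
    · simp [hlen]
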